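-- pv_equiv track=rewrite | github.com/sethdford/pocket-voice | scripts/normalize_text.py | ordinal_to_words
-- ===== SOURCE A (Python) =====
-- ONES = [
--     "", "one", "two", "three", "four", "five", "six", "seven", "eight", "nine",
--     "ten", "eleven", "twelve", "thirteen", "fourteen", "fifteen", "sixteen",
--     "seventeen", "eighteen", "nineteen",
-- ]
--
-- TENS = [
--     "", "", "twenty", "thirty", "forty", "fifty", "sixty", "seventy",
--     "eighty", "ninety",
-- ]
--
-- ORDINAL_ONES = [
--     "", "first", "second", "third", "fourth", "fifth", "sixth", "seventh",
--     "eighth", "ninth", "tenth", "eleventh", "twelfth", "thirteenth",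
--     "fourteenth", "fifteenth", "sixteenth", "seventeenth", "eighteenth",
--     "nineteenth",
-- ]
--
-- ORDINAL_TENS = [
--     "", "", "twentieth", "thirtieth", "fortieth", "fiftieth",
--     "sixtieth", "seventieth", "eightieth", "ninetieth",
-- ]
--
-- def number_to_words(n: int) -> str:
--     """Convert integer to words (cardinal)."""
--     if n < 0:
--         return "negative " + number_to_words(-n)
--     if n == 0:
--         return "zero"
--     parts = []
--     for divisor, label in [(10**12, "trillion"), (10**9, "billion"),
--                           (10**6, "million"), (10**3, "thousand")]:
--         if n >= divisor:
--             parts.append(number_to_words(n // divisor) + " " + label)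
--             n %= divisor
--     if n >= 100:
--         parts.append(ONES[n // 100] + " hundred")
--         n %= 100
--     if n >= 20:
--         t, o = divmod(n, 10)
--         parts.append(TENS[t] + ("-" + ONES[o] if o else ""))
--     elif n > 0:
--         parts.append(ONES[n])
--     return " ".join(parts)
--
-- def ordinal_to_words(n: int) -> str:
--     """Convert integer to ordinal words."""
--     if n < 0:
--         return "negative " + ordinal_to_words(-n)
--     if n == 0:
--         return "zeroth"
--     if n >= 100:
--         hundreds = (n // 100) * 100
--         rem = n % 100
--         if rem == 0:
--             return number_to_words(hundreds) + "th"
--         return number_to_words(hundreds) + " " + ordinal_to_words(rem)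
--     if n >= 20:
--         t, o = divmod(n, 10)
--         if o:
--             return TENS[t] + "-" + ORDINAL_ONES[o]
--         return ORDINAL_TENS[t]
--     return ORDINAL_ONES[n]
-- ===== SOURCE B (Python) =====
-- ONES = [
--     "", "one", "two", "three", "four", "five", "six", "seven", "eight", "nine",
--     "ten", "eleven", "twelve", "thirteen", "fourteen", "fifteen", "sixteen",
--     "seventeen", "eighteen", "nineteen",
-- ]
--
-- TENS = [
--     "", "", "twenty", "thirty", "forty", "fifty", "sixty", "seventy",
--     "eighty", "ninety",
-- ]
--
-- ORDINAL_ONES = [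
--     "", "first", "second", "third", "fourth", "fifth", "sixth", "seventh",
--     "eighth", "ninth", "tenth", "eleventh", "twelfth", "thirteenth",
--     "fourteenth", "fifteenth", "sixteenth", "seventeenth", "eighteenth",
--     "nineteenth",
-- ]
--
-- ORDINAL_TENS = [
--     "", "", "twentieth", "thirtieth", "fortieth", "fiftieth",
--     "sixtieth", "seventieth", "eightieth", "ninetieth",
-- ]
--
-- _SCALES = [(10**12, "trillion"), (10**9, "billion"),
--            (10**6, "million"), (10**3, "thousand")]
-- _MAGNITUDES = {"hundred", "thousand", "million", "billion", "trillion"}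
-- _ORD_ONES = dict(zip(ONES[1:], ORDINAL_ONES[1:]))
-- _ORD_TENS = dict(zip(TENS[2:], ORDINAL_TENS[2:]))
--
-- def _cardinal_tokens(n: int) -> list:
--     """Word tokens of the cardinal of n (n > 0)."""
--     words = []
--     for divisor, label in _SCALES:
--         q, n = divmod(n, divisor)
--         if q:
--             words += _cardinal_tokens(q) + [label]
--     h, r = divmod(n, 100)
--     if h:
--         words += [ONES[h], "hundred"]
--     if r >= 20:
--         t, o = divmod(r, 10)
--         words.append(TENS[t] + ("-" + ONES[o] if o else ""))
--     elif r:
--         words.append(ONES[r])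
--     return words
--
-- def _ordinal_word(w: str) -> str:
--     """Ordinalize a single cardinal word (possibly hyphenated tens-ones)."""
--     if "-" in w:
--         t, o = w.split("-")
--         return t + "-" + _ORD_ONES[o]
--     if w in _MAGNITUDES:
--         return w + "th"
--     if w in _ORD_TENS:
--         return _ORD_TENS[w]
--     return _ORD_ONES[w]
--
-- def ordinal_to_words(n: int) -> str:
--     """Convert integer to ordinal words."""
--     if n < 0:
--         return "negative " + ordinal_to_words(-n)
--     if n == 0:
--         return "zeroth"
--     words = _cardinal_tokens(n)
--     words[-1] = _ordinal_word(words[-1])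
--     return " ".join(words)
-- ===== Notes on version B (the rewrite author's own statement) =====
-- stated objective: alternative
-- what changed: B builds the cardinal as a list of word tokens in one divmod-driven pass (no per-case ordinal arithmetic and no hundreds/remainder recursion in the ordinal logic) and then ordinalizes only the last token via small word maps, instead of A's recursive case analysis that rebuilds hundreds/tens/ones ordinal pieces arithmetically.
import Mathlib
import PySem

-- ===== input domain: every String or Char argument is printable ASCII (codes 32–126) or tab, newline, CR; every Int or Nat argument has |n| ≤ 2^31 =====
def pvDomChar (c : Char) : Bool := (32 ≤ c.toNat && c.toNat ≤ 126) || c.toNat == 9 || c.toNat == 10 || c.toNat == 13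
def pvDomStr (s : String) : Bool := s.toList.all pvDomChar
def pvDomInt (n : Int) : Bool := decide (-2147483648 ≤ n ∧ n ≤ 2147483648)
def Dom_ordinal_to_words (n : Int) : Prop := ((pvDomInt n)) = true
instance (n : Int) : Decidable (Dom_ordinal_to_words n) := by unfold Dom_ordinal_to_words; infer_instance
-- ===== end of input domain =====

-- B re-implements ordinal_to_words by emitting the cardinal as a token list in one
-- divmod pass and ordinalizing only its last token through small word maps
-- (objective: alternative decomposition, same cost); proved equal to A on every input.

-- ===== PORT A =====

def ONES : List String := ["", "one", "two", "three", "four", "five", "six", "seven", "eight", "nine",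
  "ten", "eleven", "twelve", "thirteen", "fourteen", "fifteen", "sixteen",
  "seventeen", "eighteen", "nineteen"]
def TENS : List String := ["", "", "twenty", "thirty", "forty", "fifty", "sixty", "seventy", "eighty", "ninety"]
def ORDINAL_ONES : List String := ["", "first", "second", "third", "fourth", "fifth", "sixth", "seventh",
  "eighth", "ninth", "tenth", "eleventh", "twelfth", "thirteenth",
  "fourteenth", "fifteenth", "sixteenth", "seventeenth", "eighteenth", "nineteenth"]
def ORDINAL_TENS : List String := ["", "", "twentieth", "thirtieth", "fortieth", "fiftieth",
  "sixtieth", "seventieth", "eightieth", "ninetieth"]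

-- number_to_words's divisor loop, unrolled over its 4-element literal list; the recursive
-- call number_to_words(n // divisor) has a positive argument, so it is its n > 0 branch,
-- i.e. cardCore itself.  fuel is a totality guard only: every call passes fuel > n, and the
-- fuel-0 branch is unreachable (ONES[...]/TENS[...] indices are always in range: List.getD).
def cardCore : Nat → Nat → String
  | 0, _ => ""
  | f+1, n =>
    let pT := if n ≥ 1000000000000 then [cardCore f (n / 1000000000000) ++ " trillion"] else []
    let n1 := if n ≥ 1000000000000 then n % 1000000000000 else n
    let pB := if n1 ≥ 1000000000 then [cardCore f (n1 / 1000000000) ++ " billion"] else []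
    let n2 := if n1 ≥ 1000000000 then n1 % 1000000000 else n1
    let pM := if n2 ≥ 1000000 then [cardCore f (n2 / 1000000) ++ " million"] else []
    let n3 := if n2 ≥ 1000000 then n2 % 1000000 else n2
    let pK := if n3 ≥ 1000 then [cardCore f (n3 / 1000) ++ " thousand"] else []
    let n4 := if n3 ≥ 1000 then n3 % 1000 else n3
    let pH := if n4 ≥ 100 then [ONES.getD (n4 / 100) "" ++ " hundred"] else []
    let n5 := if n4 ≥ 100 then n4 % 100 else n4
    let pL := if n5 ≥ 20 then
        [TENS.getD (n5 / 10) "" ++ (if n5 % 10 ≠ 0 then "-" ++ ONES.getD (n5 % 10) "" else "")]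
      else if n5 > 0 then [ONES.getD n5 ""] else []
    PySem.Str.join " " (pT ++ pB ++ pM ++ pK ++ pH ++ pL)

-- number_to_words; its n < 0 branch is unreachable from ordinal_to_words (all call sites
-- pass nonnegative arguments), so the helper lives on Nat.
def number_to_words (n : Nat) : String := if n = 0 then "zero" else cardCore (n+1) n

-- ordinal_to_words on n ≥ 0; the recursive call ordinal_to_words(rem) has rem ≥ 0.
-- fuel is a totality guard only (every call passes fuel > n; fuel-0 is unreachable).
def ordCore : Nat → Nat → String
  | 0, _ => ""
  | f+1, n =>
    if n = 0 then "zeroth"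
    else if n ≥ 100 then
      let hundreds := n / 100 * 100
      let rem := n % 100
      if rem = 0 then number_to_words hundreds ++ "th"
      else number_to_words hundreds ++ " " ++ ordCore f rem
    else if n ≥ 20 then
      let t := n / 10
      let o := n % 10
      if o ≠ 0 then TENS.getD t "" ++ "-" ++ ORDINAL_ONES.getD o ""
      else ORDINAL_TENS.getD t ""
    else ORDINAL_ONES.getD n ""

-- the n < 0 branch 'negative ' + ordinal_to_words(-n) is unfolded once (-n ≥ 0)
def ordinal_to_words (n : Int) : String :=
  if n < 0 then "negative " ++ ordCore ((-n).toNat + 1) (-n).toNat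
  else ordCore (n.toNat + 1) n.toNat

-- ===== PORT B =====

def pyMagnitudes : PySem.Set String := PySem.Set.ofList ["hundred", "thousand", "million", "billion", "trillion"]
-- dict(zip(ONES[1:], ORDINAL_ONES[1:])) — distinct keys, insertion order
def ordOnesMap : PySem.Dict String String := PySem.Dict.ofList (List.zip (ONES.drop 1) (ORDINAL_ONES.drop 1))
def ordTensMap : PySem.Dict String String := PySem.Dict.ofList (List.zip (TENS.drop 2) (ORDINAL_TENS.drop 2))

-- _cardinal_tokens: the divmod loop over _SCALES is unrolled over its 4-element literal
-- list (q, n = divmod(n, divisor); 'if q' = q ≠ 0); each recursive call receives a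
-- positive argument.  fuel is a totality guard only: every call passes fuel > n.
def cardTokens : Nat → Nat → List String
  | 0, _ => []
  | f+1, n =>
    let q1 := n / 1000000000000
    let n1 := n % 1000000000000
    let w1 := if q1 ≠ 0 then cardTokens f q1 ++ ["trillion"] else []
    let q2 := n1 / 1000000000
    let n2 := n1 % 1000000000
    let w2 := if q2 ≠ 0 then cardTokens f q2 ++ ["billion"] else []
    let q3 := n2 / 1000000
    let n3 := n2 % 1000000
    let w3 := if q3 ≠ 0 then cardTokens f q3 ++ ["million"] else []
    let q4 := n3 / 1000
    let n4 := n3 % 1000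
    let w4 := if q4 ≠ 0 then cardTokens f q4 ++ ["thousand"] else []
    let h := n4 / 100
    let r := n4 % 100
    let wh := if h ≠ 0 then [ONES.getD h "", "hundred"] else []
    let wl := if r ≥ 20 then
        [TENS.getD (r / 10) "" ++ (if r % 10 ≠ 0 then "-" ++ ONES.getD (r % 10) "" else "")]
      else if r > 0 then [ONES.getD r ""] else []
    w1 ++ w2 ++ w3 ++ w4 ++ wh ++ wl

def ordinalWord (w : String) : String :=
  if PySem.Str.isIn "-" w then
    match (PySem.Str.split? w "-").getD [] with
    | [t, o] => t ++ "-" ++ PySem.Dict.getD ordOnesMap o ""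
    | _ => ""   -- Python raises on unpack mismatch; unreachable for cardinal tokens
  else if PySem.Set.contains pyMagnitudes w then w ++ "th"
  else if (PySem.Dict.get? ordTensMap w).isSome then PySem.Dict.getD ordTensMap w ""
  else PySem.Dict.getD ordOnesMap w ""
  -- the getD defaults are unreachable (KeyError cannot happen on cardinal tokens)

-- words[-1] = _ordinal_word(words[-1]) on the nonempty token list, then " ".join
def altCore (n : Nat) : String :=
  if n = 0 then "zeroth"
  else
    let ws := cardTokens (n+1) n
    PySem.Str.join " " (ws.dropLast ++ [ordinalWord (ws.getLast?.getD "")])  -- ws ≠ [] always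

-- the n < 0 branch 'negative ' + ordinal_to_words(-n) is unfolded once (-n ≥ 0)
def ordinal_to_words_alt (n : Int) : String :=
  if n < 0 then "negative " ++ altCore (-n).toNat else altCore n.toNat

-- ===== PRECONDITION & SPEC =====
def Spec_ordinal_to_words (n : Int) (out : String) : Prop := out = ordinal_to_words_alt n
instance (n : Int) (out : String) : Decidable (Spec_ordinal_to_words n out) := by unfold Spec_ordinal_to_words; infer_instance

-- ===== CLAIM (what is proved, stated in full; the proofs are below) =====
def Claim_equal_ordinal_to_words : Prop := ∀ (n : Int), Dom_ordinal_to_words n → Spec_ordinal_to_words n (ordinal_to_words n)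

-- ===== LEMMAS AND PROOFS =====

-- ---- generic facts about PySem.Chars.join (single-char separator " ") ----

theorem pvJoinAppend (sep : List Char) : ∀ (xs ys : List (List Char)), xs ≠ [] → ys ≠ [] →
    PySem.Chars.join sep (xs ++ ys) = PySem.Chars.join sep xs ++ sep ++ PySem.Chars.join sep ys := by
  intro xs
  induction xs with
  | nil => intro ys h; exact absurd rfl h
  | cons x rest ih =>
    intro ys _ hys
    cases rest with
    | nil =>
      cases ys with
      | nil => exact absurd rfl hys
      | cons y ys2 => simp [PySem.Chars.join_cons_cons, PySem.Chars.join_singleton]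
    | cons x2 rest2 =>
      have e : (x :: x2 :: rest2) ++ ys = x :: ((x2 :: rest2) ++ ys) := rfl
      have e2 : (x2 :: rest2) ++ ys = x2 :: (rest2 ++ ys) := rfl
      rw [e, e2, PySem.Chars.join_cons_cons, ← e2, ih ys (by simp) hys, PySem.Chars.join_cons_cons]
      simp [List.append_assoc]

theorem pvJoinFlat : ∀ (pss : List (List (List Char))), (∀ g ∈ pss, g ≠ []) →
    PySem.Chars.join [' '] (pss.map (PySem.Chars.join [' '])) = PySem.Chars.join [' '] pss.flatten := by
  intro pss
  induction pss with
  | nil => intro _; rfl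
  | cons g rest ih =>
    intro hne
    cases rest with
    | nil => simp [PySem.Chars.join_singleton]
    | cons g2 rest2 =>
      have hg : g ≠ [] := hne g (by simp)
      have hflat : (g2 :: rest2).flatten ≠ [] := by
        have : g2 ≠ [] := hne g2 (by simp)
        cases g2 with
        | nil => exact absurd rfl this
        | cons c cs => simp
      calc PySem.Chars.join [' '] ((g :: g2 :: rest2).map (PySem.Chars.join [' ']))
          = PySem.Chars.join [' '] g ++ [' '] ++ PySem.Chars.join [' '] ((g2 :: rest2).map (PySem.Chars.join [' '])) := by
            simp only [List.map_cons]
            rw [PySem.Chars.join_cons_cons]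
        _ = PySem.Chars.join [' '] g ++ [' '] ++ PySem.Chars.join [' '] (g2 :: rest2).flatten := by
            rw [ih (fun x hx => hne x (by simp [hx]))]
        _ = PySem.Chars.join [' '] (g ++ (g2 :: rest2).flatten) := by
            rw [pvJoinAppend [' '] g (g2 :: rest2).flatten hg hflat]
        _ = PySem.Chars.join [' '] (g :: g2 :: rest2).flatten := by simp

-- ---- token-level model of number_to_words ----

def lowSeg (r : Nat) : List (List Char) :=
  if r ≥ 20 then [(TENS.getD (r / 10) "").toList ++ (if r % 10 ≠ 0 then '-' :: (ONES.getD (r % 10) "").toList else [])]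
  else if r > 0 then [(ONES.getD r "").toList] else []

def tokCore : Nat → Nat → List (List Char)
  | 0, _ => []
  | f+1, n =>
    (if n ≥ 1000000000000 then tokCore f (n / 1000000000000) ++ ["trillion".toList] else []) ++
    (if n % 1000000000000 ≥ 1000000000 then tokCore f (n % 1000000000000 / 1000000000) ++ ["billion".toList] else []) ++
    (if n % 1000000000 ≥ 1000000 then tokCore f (n % 1000000000 / 1000000) ++ ["million".toList] else []) ++
    (if n % 1000000 ≥ 1000 then tokCore f (n % 1000000 / 1000) ++ ["thousand".toList] else []) ++
    (if n % 1000 ≥ 100 then [(ONES.getD (n % 1000 / 100) "").toList, "hundred".toList] else []) ++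
    lowSeg (n % 100)

set_option maxRecDepth 200000 in
theorem pvOnesNoSpace : ∀ (i : Nat), ' ' ∉ (ONES.getD i "").toList := by
  intro i
  by_cases h : i < 20
  · revert h
    exact (by decide : ∀ i < 20, ' ' ∉ (ONES.getD i "").toList) i
  · rw [List.getD_eq_default _ _ (by simp [ONES]; omega)]
    simp

set_option maxRecDepth 200000 in
theorem pvTensNoSpace : ∀ (i : Nat), ' ' ∉ (TENS.getD i "").toList := by
  intro i
  by_cases h : i < 10
  · revert h
    exact (by decide : ∀ i < 10, ' ' ∉ (TENS.getD i "").toList) i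
  · rw [List.getD_eq_default _ _ (by simp [TENS]; omega)]
    simp

theorem pvLowSegNoSpace (r : Nat) : ∀ t ∈ lowSeg r, ' ' ∉ t := by
  unfold lowSeg
  split
  · intro t ht hc
    simp only [List.mem_singleton] at ht
    subst ht
    rcases List.mem_append.1 hc with h | h
    · exact pvTensNoSpace _ h
    · split at h
      · rcases List.mem_cons.1 h with h | h
        · exact absurd h (by decide)
        · exact pvOnesNoSpace _ h
      · simp at h
  · split
    · intro t ht hc
      simp only [List.mem_singleton] at ht
      subst ht
      exact pvOnesNoSpace _ hc
    · intro t ht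
      simp at ht

theorem pvModIf (n d : Nat) : (if n ≥ d then n % d else n) = n % d := by
  split
  · rfl
  · rcases Nat.eq_zero_or_pos d with h | h
    · simp [h]
    · exact (Nat.mod_eq_of_lt (by omega)).symm

theorem pvFlattenIte (c : Prop) [Decidable c] (X : List (List Char)) :
    (if c then [X] else []).flatten = if c then X else [] := by
  split <;> simp

theorem pvLowMap (r : Nat) :
    (if r ≥ 20 then [TENS.getD (r / 10) "" ++ (if r % 10 ≠ 0 then "-" ++ ONES.getD (r % 10) "" else "")]
     else if r > 0 then [ONES.getD r ""] else []).map String.toList = lowSeg r := by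
  unfold lowSeg
  split
  · simp only [List.map_cons, List.map_nil]
    congr 1
    rw [String.toList_append]
    congr 1
    split
    · rw [String.toList_append]
      rfl
    · rfl
  · split <;> rfl

theorem pvFlattenSingles {α : Type} (l : List α) : (l.map (fun t => [t])).flatten = l := by
  induction l with
  | nil => rfl
  | cons x xs ih => simp [ih]

theorem pvTokSpec (f : Nat) : ∀ n, n < f → 1 ≤ n →
    (cardCore f n).toList = PySem.Chars.join [' '] (tokCore f n) ∧ tokCore f n ≠ [] ∧
      ∀ t ∈ tokCore f n, ' ' ∉ t := by
  induction f with
  | zero => intro n h; omega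
  | succ f ih =>
    intro n hn h1
    have e : cardCore (f+1) n = PySem.Str.join " " (
        (if n ≥ 1000000000000 then [cardCore f (n / 1000000000000) ++ " trillion"] else []) ++
        (if n % 1000000000000 ≥ 1000000000 then [cardCore f (n % 1000000000000 / 1000000000) ++ " billion"] else []) ++
        (if n % 1000000000 ≥ 1000000 then [cardCore f (n % 1000000000 / 1000000) ++ " million"] else []) ++
        (if n % 1000000 ≥ 1000 then [cardCore f (n % 1000000 / 1000) ++ " thousand"] else []) ++
        (if n % 1000 ≥ 100 then [ONES.getD (n % 1000 / 100) "" ++ " hundred"] else []) ++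
        (if n % 100 ≥ 20 then [TENS.getD (n % 100 / 10) "" ++ (if n % 100 % 10 ≠ 0 then "-" ++ ONES.getD (n % 100 % 10) "" else "")]
         else if n % 100 > 0 then [ONES.getD (n % 100) ""] else [])) := by
      simp only [cardCore]
      rw [pvModIf n 1000000000000, pvModIf (n % 1000000000000) 1000000000,
          Nat.mod_mod_of_dvd n (by norm_num : (1000000000:Nat) ∣ 1000000000000),
          pvModIf (n % 1000000000) 1000000,
          Nat.mod_mod_of_dvd n (by norm_num : (1000000:Nat) ∣ 1000000000),
          pvModIf (n % 1000000) 1000,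
          Nat.mod_mod_of_dvd n (by norm_num : (1000:Nat) ∣ 1000000),
          pvModIf (n % 1000) 100,
          Nat.mod_mod_of_dvd n (by norm_num : (100:Nat) ∣ 1000)]
    have eT : tokCore (f+1) n =
        (if n ≥ 1000000000000 then tokCore f (n / 1000000000000) ++ ["trillion".toList] else []) ++
        (if n % 1000000000000 ≥ 1000000000 then tokCore f (n % 1000000000000 / 1000000000) ++ ["billion".toList] else []) ++
        (if n % 1000000000 ≥ 1000000 then tokCore f (n % 1000000000 / 1000000) ++ ["million".toList] else []) ++
        (if n % 1000000 ≥ 1000 then tokCore f (n % 1000000 / 1000) ++ ["thousand".toList] else []) ++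
        (if n % 1000 ≥ 100 then [(ONES.getD (n % 1000 / 100) "").toList, "hundred".toList] else []) ++
        lowSeg (n % 100) := by
      simp only [tokCore]
    -- per-segment map equalities
    have p1 : (if n ≥ 1000000000000 then [cardCore f (n / 1000000000000) ++ " trillion"] else []).map String.toList
        = (if n ≥ 1000000000000 then [tokCore f (n / 1000000000000) ++ ["trillion".toList]] else []).map (PySem.Chars.join [' ']) := by
      by_cases hc : n ≥ 1000000000000
      · obtain ⟨hcard, hne, -⟩ := ih (n / 1000000000000) (by omega) (by omega)
        simp only [if_pos hc, List.map_cons, List.map_nil]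
        congr 1
        rw [String.toList_append, hcard, pvJoinAppend [' '] _ _ hne (by simp), PySem.Chars.join_singleton]
        rw [show (" trillion" : String).toList = [' '] ++ "trillion".toList from by decide, List.append_assoc]
      · simp [hc]
    have p2 : (if n % 1000000000000 ≥ 1000000000 then [cardCore f (n % 1000000000000 / 1000000000) ++ " billion"] else []).map String.toList
        = (if n % 1000000000000 ≥ 1000000000 then [tokCore f (n % 1000000000000 / 1000000000) ++ ["billion".toList]] else []).map (PySem.Chars.join [' ']) := by
      by_cases hc : n % 1000000000000 ≥ 1000000000
      · obtain ⟨hcard, hne, -⟩ := ih (n % 1000000000000 / 1000000000) (by omega) (by omega)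
        simp only [if_pos hc, List.map_cons, List.map_nil]
        congr 1
        rw [String.toList_append, hcard, pvJoinAppend [' '] _ _ hne (by simp), PySem.Chars.join_singleton]
        rw [show (" billion" : String).toList = [' '] ++ "billion".toList from by decide, List.append_assoc]
      · simp [hc]
    have p3 : (if n % 1000000000 ≥ 1000000 then [cardCore f (n % 1000000000 / 1000000) ++ " million"] else []).map String.toList
        = (if n % 1000000000 ≥ 1000000 then [tokCore f (n % 1000000000 / 1000000) ++ ["million".toList]] else []).map (PySem.Chars.join [' ']) := by
      by_cases hc : n % 1000000000 ≥ 1000000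
      · obtain ⟨hcard, hne, -⟩ := ih (n % 1000000000 / 1000000) (by omega) (by omega)
        simp only [if_pos hc, List.map_cons, List.map_nil]
        congr 1
        rw [String.toList_append, hcard, pvJoinAppend [' '] _ _ hne (by simp), PySem.Chars.join_singleton]
        rw [show (" million" : String).toList = [' '] ++ "million".toList from by decide, List.append_assoc]
      · simp [hc]
    have p4 : (if n % 1000000 ≥ 1000 then [cardCore f (n % 1000000 / 1000) ++ " thousand"] else []).map String.toList
        = (if n % 1000000 ≥ 1000 then [tokCore f (n % 1000000 / 1000) ++ ["thousand".toList]] else []).map (PySem.Chars.join [' ']) := by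
      by_cases hc : n % 1000000 ≥ 1000
      · obtain ⟨hcard, hne, -⟩ := ih (n % 1000000 / 1000) (by omega) (by omega)
        simp only [if_pos hc, List.map_cons, List.map_nil]
        congr 1
        rw [String.toList_append, hcard, pvJoinAppend [' '] _ _ hne (by simp), PySem.Chars.join_singleton]
        rw [show (" thousand" : String).toList = [' '] ++ "thousand".toList from by decide, List.append_assoc]
      · simp [hc]
    have p5 : (if n % 1000 ≥ 100 then [ONES.getD (n % 1000 / 100) "" ++ " hundred"] else []).map String.toList
        = (if n % 1000 ≥ 100 then [[(ONES.getD (n % 1000 / 100) "").toList, "hundred".toList]] else []).map (PySem.Chars.join [' ']) := by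
      by_cases hc : n % 1000 ≥ 100
      · simp only [if_pos hc, List.map_cons, List.map_nil]
        congr 1
        rw [String.toList_append, PySem.Chars.join_cons_cons, PySem.Chars.join_singleton]
        rw [show (" hundred" : String).toList = [' '] ++ "hundred".toList from by decide, List.append_assoc]
      · simp [hc]
    have p6 := pvLowMap (n % 100)
    have p6' : ((lowSeg (n % 100)).map (fun t => [t])).map (PySem.Chars.join [' ']) = lowSeg (n % 100) := by
      rw [List.map_map]
      have hcomp : (PySem.Chars.join [' '] ∘ fun t => [t]) = (id : List Char → List Char) := by
        funext t; simp [PySem.Chars.join_singleton]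
      rw [hcomp, List.map_id]
    refine ⟨?_, ?_, ?_⟩
    · -- the join/toList equation
      rw [e, eT]
      rw [PySem.Str.toList_join, show (" " : String).toList = [' '] from by decide]
      have hmap : ((if n ≥ 1000000000000 then [cardCore f (n / 1000000000000) ++ " trillion"] else []) ++
          (if n % 1000000000000 ≥ 1000000000 then [cardCore f (n % 1000000000000 / 1000000000) ++ " billion"] else []) ++
          (if n % 1000000000 ≥ 1000000 then [cardCore f (n % 1000000000 / 1000000) ++ " million"] else []) ++
          (if n % 1000000 ≥ 1000 then [cardCore f (n % 1000000 / 1000) ++ " thousand"] else []) ++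
          (if n % 1000 ≥ 100 then [ONES.getD (n % 1000 / 100) "" ++ " hundred"] else []) ++
          (if n % 100 ≥ 20 then [TENS.getD (n % 100 / 10) "" ++ (if n % 100 % 10 ≠ 0 then "-" ++ ONES.getD (n % 100 % 10) "" else "")]
           else if n % 100 > 0 then [ONES.getD (n % 100) ""] else [])).map String.toList
          = ((if n ≥ 1000000000000 then [tokCore f (n / 1000000000000) ++ ["trillion".toList]] else []) ++
          (if n % 1000000000000 ≥ 1000000000 then [tokCore f (n % 1000000000000 / 1000000000) ++ ["billion".toList]] else []) ++
          (if n % 1000000000 ≥ 1000000 then [tokCore f (n % 1000000000 / 1000000) ++ ["million".toList]] else []) ++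
          (if n % 1000000 ≥ 1000 then [tokCore f (n % 1000000 / 1000) ++ ["thousand".toList]] else []) ++
          (if n % 1000 ≥ 100 then [[(ONES.getD (n % 1000 / 100) "").toList, "hundred".toList]] else []) ++
          (lowSeg (n % 100)).map (fun t => [t])).map (PySem.Chars.join [' ']) := by
        simp only [List.map_append]
        rw [p1, p2, p3, p4, p5, p6, p6']
      rw [hmap, pvJoinFlat _ ?hne]
      case hne =>
        intro g hg
        simp only [List.mem_append] at hg
        rcases hg with ((((hg | hg) | hg) | hg) | hg) | hg
        · revert hg; split
          · intro hg; simp only [List.mem_singleton] at hg; subst hg; simp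
          · intro hg; simp at hg
        · revert hg; split
          · intro hg; simp only [List.mem_singleton] at hg; subst hg; simp
          · intro hg; simp at hg
        · revert hg; split
          · intro hg; simp only [List.mem_singleton] at hg; subst hg; simp
          · intro hg; simp at hg
        · revert hg; split
          · intro hg; simp only [List.mem_singleton] at hg; subst hg; simp
          · intro hg; simp at hg
        · revert hg; split
          · intro hg; simp only [List.mem_singleton] at hg; subst hg; simp
          · intro hg; simp at hg
        · simp only [List.mem_map] at hg; obtain ⟨x, -, hx⟩ := hg; subst hx; simp
      congr 1
      simp only [List.flatten_append, pvFlattenIte, pvFlattenSingles]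
    · -- nonemptiness
      rw [eT]
      intro hnil
      simp only [List.append_eq_nil_iff] at hnil
      obtain ⟨⟨⟨⟨⟨g1, g2⟩, g3⟩, g4⟩, g5⟩, g6⟩ := hnil
      have c1 : ¬ n ≥ 1000000000000 := by intro hc; rw [if_pos hc] at g1; simp at g1
      have c2 : ¬ n % 1000000000000 ≥ 1000000000 := by intro hc; rw [if_pos hc] at g2; simp at g2
      have c3 : ¬ n % 1000000000 ≥ 1000000 := by intro hc; rw [if_pos hc] at g3; simp at g3
      have c4 : ¬ n % 1000000 ≥ 1000 := by intro hc; rw [if_pos hc] at g4; simp at g4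
      have c5 : ¬ n % 1000 ≥ 100 := by intro hc; rw [if_pos hc] at g5; simp at g5
      have c6 : n % 100 = 0 := by
        by_contra hr
        unfold lowSeg at g6
        rcases (by omega : n % 100 ≥ 20 ∨ (¬ n % 100 ≥ 20 ∧ n % 100 > 0)) with h | ⟨h, h'⟩
        · rw [if_pos h] at g6; simp at g6
        · rw [if_neg h, if_pos h'] at g6; simp at g6
      omega
    · -- space-freeness
      rw [eT]
      intro t ht
      simp only [List.mem_append] at ht
      rcases ht with ((((ht | ht) | ht) | ht) | ht) | ht
      · revert ht; split
        · next hc =>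
          intro ht
          rcases List.mem_append.1 ht with h | h
          · exact (ih (n / 1000000000000) (by omega) (by omega)).2.2 t h
          · simp only [List.mem_singleton] at h; subst h; decide
        · intro ht; simp at ht
      · revert ht; split
        · next hc =>
          intro ht
          rcases List.mem_append.1 ht with h | h
          · exact (ih (n % 1000000000000 / 1000000000) (by omega) (by omega)).2.2 t h
          · simp only [List.mem_singleton] at h; subst h; decide
        · intro ht; simp at ht
      · revert ht; split
        · next hc =>
          intro ht
          rcases List.mem_append.1 ht with h | h
          · exact (ih (n % 1000000000 / 1000000) (by omega) (by omega)).2.2 t h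
          · simp only [List.mem_singleton] at h; subst h; decide
        · intro ht; simp at ht
      · revert ht; split
        · next hc =>
          intro ht
          rcases List.mem_append.1 ht with h | h
          · exact (ih (n % 1000000 / 1000) (by omega) (by omega)).2.2 t h
          · simp only [List.mem_singleton] at h; subst h; decide
        · intro ht; simp at ht
      · revert ht; split
        · intro ht
          rcases List.mem_cons.1 ht with h | h
          · subst h; exact pvOnesNoSpace _
          · simp only [List.mem_singleton] at h; subst h; decide
        · intro ht; simp at ht
      · exact pvLowSegNoSpace _ t ht

theorem pvTokFuel : ∀ (f g n : Nat), n < f → n < g → tokCore f n = tokCore g n := by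
  intro f
  induction f with
  | zero => intro g n h; omega
  | succ f ih =>
    intro g n hf hg
    cases g with
    | zero => omega
    | succ g =>
      simp only [tokCore]
      have s1 : (if n ≥ 1000000000000 then tokCore f (n / 1000000000000) ++ ["trillion".toList] else [])
          = (if n ≥ 1000000000000 then tokCore g (n / 1000000000000) ++ ["trillion".toList] else []) := by
        split_ifs with hc
        · rw [ih g (n / 1000000000000) (by omega) (by omega)]
        · rfl
      have s2 : (if n % 1000000000000 ≥ 1000000000 then tokCore f (n % 1000000000000 / 1000000000) ++ ["billion".toList] else [])
          = (if n % 1000000000000 ≥ 1000000000 then tokCore g (n % 1000000000000 / 1000000000) ++ ["billion".toList] else []) := by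
        split_ifs with hc
        · rw [ih g (n % 1000000000000 / 1000000000) (by omega) (by omega)]
        · rfl
      have s3 : (if n % 1000000000 ≥ 1000000 then tokCore f (n % 1000000000 / 1000000) ++ ["million".toList] else [])
          = (if n % 1000000000 ≥ 1000000 then tokCore g (n % 1000000000 / 1000000) ++ ["million".toList] else []) := by
        split_ifs with hc
        · rw [ih g (n % 1000000000 / 1000000) (by omega) (by omega)]
        · rfl
      have s4 : (if n % 1000000 ≥ 1000 then tokCore f (n % 1000000 / 1000) ++ ["thousand".toList] else [])
          = (if n % 1000000 ≥ 1000 then tokCore g (n % 1000000 / 1000) ++ ["thousand".toList] else []) := by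
        split_ifs with hc
        · rw [ih g (n % 1000000 / 1000) (by omega) (by omega)]
        · rfl
      rw [s1, s2, s3, s4]

-- ---- the bridge: B's token builder computes exactly the token model ----

theorem pvCardToksToList : ∀ (f : Nat) (n : Nat), (cardTokens f n).map String.toList = tokCore f n := by
  intro f
  induction f with
  | zero => intro n; rfl
  | succ f ih =>
    intro n
    simp only [cardTokens, tokCore]
    have b1 : (if n / 1000000000000 ≠ 0 then cardTokens f (n / 1000000000000) ++ ["trillion"] else []).map String.toList
        = (if n ≥ 1000000000000 then tokCore f (n / 1000000000000) ++ ["trillion".toList] else []) := by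
      rw [if_congr (by omega : n / 1000000000000 ≠ 0 ↔ n ≥ 1000000000000) rfl rfl]
      split
      · simp [ih]
      · rfl
    have b2 : (if n % 1000000000000 / 1000000000 ≠ 0 then cardTokens f (n % 1000000000000 / 1000000000) ++ ["billion"] else []).map String.toList
        = (if n % 1000000000000 ≥ 1000000000 then tokCore f (n % 1000000000000 / 1000000000) ++ ["billion".toList] else []) := by
      rw [if_congr (by omega : n % 1000000000000 / 1000000000 ≠ 0 ↔ n % 1000000000000 ≥ 1000000000) rfl rfl]
      split
      · simp [ih]
      · rfl
    have e2 : n % 1000000000000 % 1000000000 = n % 1000000000 :=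
      Nat.mod_mod_of_dvd n (by norm_num)
    have b3 : (if n % 1000000000 / 1000000 ≠ 0 then cardTokens f (n % 1000000000 / 1000000) ++ ["million"] else []).map String.toList
        = (if n % 1000000000 ≥ 1000000 then tokCore f (n % 1000000000 / 1000000) ++ ["million".toList] else []) := by
      rw [if_congr (by omega : n % 1000000000 / 1000000 ≠ 0 ↔ n % 1000000000 ≥ 1000000) rfl rfl]
      split
      · simp [ih]
      · rfl
    have e3 : n % 1000000000 % 1000000 = n % 1000000 :=
      Nat.mod_mod_of_dvd n (by norm_num)
    have b4 : (if n % 1000000 / 1000 ≠ 0 then cardTokens f (n % 1000000 / 1000) ++ ["thousand"] else []).map String.toList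
        = (if n % 1000000 ≥ 1000 then tokCore f (n % 1000000 / 1000) ++ ["thousand".toList] else []) := by
      rw [if_congr (by omega : n % 1000000 / 1000 ≠ 0 ↔ n % 1000000 ≥ 1000) rfl rfl]
      split
      · simp [ih]
      · rfl
    have e4 : n % 1000000 % 1000 = n % 1000 :=
      Nat.mod_mod_of_dvd n (by norm_num)
    have b5 : (if n % 1000 / 100 ≠ 0 then [ONES.getD (n % 1000 / 100) "", "hundred"] else []).map String.toList
        = (if n % 1000 ≥ 100 then [(ONES.getD (n % 1000 / 100) "").toList, "hundred".toList] else []) := by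
      rw [if_congr (by omega : n % 1000 / 100 ≠ 0 ↔ n % 1000 ≥ 100) rfl rfl]
      split
      · rfl
      · rfl
    have e5 : n % 1000 % 100 = n % 100 :=
      Nat.mod_mod_of_dvd n (by norm_num)
    rw [e2, e3, e4, e5]
    simp only [List.map_append]
    rw [b1, b2, b3, b4, b5, pvLowMap]

theorem pvCardToks (f n : Nat) : cardTokens f n = (tokCore f n).map String.ofList := by
  rw [← pvCardToksToList f n, List.map_map]
  have hcomp : (String.ofList ∘ String.toList) = (id : String → String) := by
    funext x; simp [String.ofList_toList]
  rw [hcomp, List.map_id]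

-- ---- remaining structure lemmas ----

theorem pvTokSplit (f n : Nat) (hn : 100 ≤ n) :
    tokCore (f+1) n = tokCore (f+1) (n - n % 100) ++ lowSeg (n % 100) := by
  simp only [tokCore]
  have s1 : (if n - n % 100 ≥ 1000000000000 then tokCore f ((n - n % 100) / 1000000000000) ++ ["trillion".toList] else [])
      = (if n ≥ 1000000000000 then tokCore f (n / 1000000000000) ++ ["trillion".toList] else []) := by
    rw [show (n - n % 100) / 1000000000000 = n / 1000000000000 from by omega]
    exact if_congr (by omega) rfl rfl
  have s2 : (if (n - n % 100) % 1000000000000 ≥ 1000000000 then tokCore f ((n - n % 100) % 1000000000000 / 1000000000) ++ ["billion".toList] else [])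
      = (if n % 1000000000000 ≥ 1000000000 then tokCore f (n % 1000000000000 / 1000000000) ++ ["billion".toList] else []) := by
    rw [show (n - n % 100) % 1000000000000 / 1000000000 = n % 1000000000000 / 1000000000 from by omega]
    exact if_congr (by omega) rfl rfl
  have s3 : (if (n - n % 100) % 1000000000 ≥ 1000000 then tokCore f ((n - n % 100) % 1000000000 / 1000000) ++ ["million".toList] else [])
      = (if n % 1000000000 ≥ 1000000 then tokCore f (n % 1000000000 / 1000000) ++ ["million".toList] else []) := by
    rw [show (n - n % 100) % 1000000000 / 1000000 = n % 1000000000 / 1000000 from by omega]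
    exact if_congr (by omega) rfl rfl
  have s4 : (if (n - n % 100) % 1000000 ≥ 1000 then tokCore f ((n - n % 100) % 1000000 / 1000) ++ ["thousand".toList] else [])
      = (if n % 1000000 ≥ 1000 then tokCore f (n % 1000000 / 1000) ++ ["thousand".toList] else []) := by
    rw [show (n - n % 100) % 1000000 / 1000 = n % 1000000 / 1000 from by omega]
    exact if_congr (by omega) rfl rfl
  have s5 : (if (n - n % 100) % 1000 ≥ 100 then [(ONES.getD ((n - n % 100) % 1000 / 100) "").toList, "hundred".toList] else [])
      = (if n % 1000 ≥ 100 then [(ONES.getD (n % 1000 / 100) "").toList, "hundred".toList] else []) := by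
    rw [show (n - n % 100) % 1000 / 100 = n % 1000 / 100 from by omega]
    exact if_congr (by omega) rfl rfl
  have s6 : lowSeg ((n - n % 100) % 100) = [] := by
    rw [show (n - n % 100) % 100 = 0 from by omega]
    rfl
  rw [s1, s2, s3, s4, s5, s6]
  simp

def pvMagToks : List (List Char) := ["hundred".toList, "thousand".toList, "million".toList, "billion".toList, "trillion".toList]

theorem pvTokMag (f n : Nat) (hf : n < f + 1) (hn : 100 ≤ n) (hr : n % 100 = 0) :
    ∃ pre m, pre ≠ [] ∧ tokCore (f+1) n = pre ++ [m] ∧ m ∈ pvMagToks := by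
  simp only [tokCore]
  have hlow : lowSeg (n % 100) = [] := by rw [hr]; rfl
  rw [hlow, List.append_nil]
  by_cases c5 : n % 1000 ≥ 100
  · rw [if_pos c5]
    refine ⟨((if n ≥ 1000000000000 then tokCore f (n / 1000000000000) ++ ["trillion".toList] else []) ++
        (if n % 1000000000000 ≥ 1000000000 then tokCore f (n % 1000000000000 / 1000000000) ++ ["billion".toList] else []) ++
        (if n % 1000000000 ≥ 1000000 then tokCore f (n % 1000000000 / 1000000) ++ ["million".toList] else []) ++
        (if n % 1000000 ≥ 1000 then tokCore f (n % 1000000 / 1000) ++ ["thousand".toList] else [])) ++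
        [(ONES.getD (n % 1000 / 100) "").toList], "hundred".toList, by simp, by simp, by simp [pvMagToks]⟩
  · rw [if_neg c5, List.append_nil]
    by_cases c4 : n % 1000000 ≥ 1000
    · rw [if_pos c4]
      obtain ⟨-, hne, -⟩ := pvTokSpec f (n % 1000000 / 1000) (by omega) (by omega)
      refine ⟨(if n ≥ 1000000000000 then tokCore f (n / 1000000000000) ++ ["trillion".toList] else []) ++
          (if n % 1000000000000 ≥ 1000000000 then tokCore f (n % 1000000000000 / 1000000000) ++ ["billion".toList] else []) ++
          (if n % 1000000000 ≥ 1000000 then tokCore f (n % 1000000000 / 1000000) ++ ["million".toList] else []) ++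
          tokCore f (n % 1000000 / 1000), "thousand".toList, ?_, by simp, by simp [pvMagToks]⟩
      intro hcon
      simp only [List.append_eq_nil_iff] at hcon
      exact hne hcon.2
    · rw [if_neg c4, List.append_nil]
      by_cases c3 : n % 1000000000 ≥ 1000000
      · rw [if_pos c3]
        obtain ⟨-, hne, -⟩ := pvTokSpec f (n % 1000000000 / 1000000) (by omega) (by omega)
        refine ⟨(if n ≥ 1000000000000 then tokCore f (n / 1000000000000) ++ ["trillion".toList] else []) ++
            (if n % 1000000000000 ≥ 1000000000 then tokCore f (n % 1000000000000 / 1000000000) ++ ["billion".toList] else []) ++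
            tokCore f (n % 1000000000 / 1000000), "million".toList, ?_, by simp, by simp [pvMagToks]⟩
        intro hcon
        simp only [List.append_eq_nil_iff] at hcon
        exact hne hcon.2
      · rw [if_neg c3, List.append_nil]
        by_cases c2 : n % 1000000000000 ≥ 1000000000
        · rw [if_pos c2]
          obtain ⟨-, hne, -⟩ := pvTokSpec f (n % 1000000000000 / 1000000000) (by omega) (by omega)
          refine ⟨(if n ≥ 1000000000000 then tokCore f (n / 1000000000000) ++ ["trillion".toList] else []) ++
              tokCore f (n % 1000000000000 / 1000000000), "billion".toList, ?_, by simp, by simp [pvMagToks]⟩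
          intro hcon
          simp only [List.append_eq_nil_iff] at hcon
          exact hne hcon.2
        · rw [if_neg c2, List.append_nil]
          by_cases c1 : n ≥ 1000000000000
          · rw [if_pos c1]
            obtain ⟨-, hne, -⟩ := pvTokSpec f (n / 1000000000000) (by omega) (by omega)
            exact ⟨tokCore f (n / 1000000000000), "trillion".toList, hne, rfl, by simp [pvMagToks]⟩
          · exact absurd rfl (by omega : ¬ (0 : Nat) = 0)

theorem pvLowSingleton (r : Nat) (h0 : 0 < r) :
    lowSeg r = [(lowSeg r).headD []] := by
  unfold lowSeg
  split_ifs with hhy h20 <;> first | simp | omega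

theorem pvOrdLow (f r : Nat) (h : r < 100) : ordCore (f+1) r = ordCore (r+1) r := by
  simp only [ordCore]
  rw [if_neg (by omega : ¬ r ≥ 100), if_neg (by omega : ¬ r ≥ 100)]

theorem pvCardFuelStr (f n : Nat) (hf : n < f) (h1 : 1 ≤ n) : cardCore f n = cardCore (n+1) n := by
  apply String.toList_inj.mp
  rw [(pvTokSpec f n hf h1).1, (pvTokSpec (n+1) n (by omega) h1).1, pvTokFuel f (n+1) n hf (by omega)]

set_option maxRecDepth 200000 in
set_option maxHeartbeats 2000000 in
theorem pvSmallMain : ∀ n, n < 100 → ordCore (n+1) n = altCore n := by decide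

set_option maxRecDepth 200000 in
set_option maxHeartbeats 2000000 in
theorem pvSmallWord : ∀ r, r < 100 → 0 < r →
    ordinalWord (String.ofList ((lowSeg r).headD [])) = ordCore (r+1) r := by decide

set_option maxRecDepth 200000 in
theorem pvMagWord : ∀ m ∈ pvMagToks, (ordinalWord (String.ofList m)).toList = m ++ "th".toList := by decide

theorem pvMainPos : ∀ n : Nat, ordCore (n+1) n = altCore n := by
  intro n
  by_cases hsm : n < 100
  · exact pvSmallMain n hsm
  · rw [Nat.not_lt] at hsm
    have hA : ordCore (n+1) n = (if n % 100 = 0 then number_to_words (n - n % 100) ++ "th"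
        else number_to_words (n - n % 100) ++ " " ++ ordCore n (n % 100)) := by
      simp only [ordCore]
      rw [if_neg (by omega : ¬ n = 0), if_pos (by omega : n ≥ 100),
          show n / 100 * 100 = n - n % 100 from by omega]
    obtain ⟨hjoin, hneT, hspT⟩ := pvTokSpec (n+1) n (by omega) (by omega)
    have hnw : (number_to_words n).toList = PySem.Chars.join [' '] (tokCore (n+1) n) := by
      unfold number_to_words
      rw [if_neg (by omega : ¬ n = 0)]
      exact hjoin
    have hB : altCore n = PySem.Str.join " " ((((tokCore (n+1) n).map String.ofList).dropLast)
        ++ [ordinalWord ((((tokCore (n+1) n).map String.ofList)).getLast?.getD "")]) := by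
      simp only [altCore]
      rw [if_neg (by omega : ¬ n = 0)]
      rw [pvCardToks]
    rw [hA, hB]
    by_cases hr : n % 100 = 0
    · rw [if_pos hr]
      obtain ⟨pre, m, hpre, htok, hm⟩ := pvTokMag n n (by omega) hsm hr
      rw [show n - n % 100 = n from by omega]
      rw [htok]
      simp only [List.map_append, List.map_cons, List.map_nil]
      rw [List.dropLast_concat, List.getLast?_concat]
      simp only [Option.getD_some]
      apply String.toList_inj.mp
      rw [String.toList_append, hnw, htok]
      rw [PySem.Str.toList_join, show (" " : String).toList = [' '] from by decide]
      simp only [List.map_append, List.map_map, List.map_cons, List.map_nil]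
      have hcomp : (String.toList ∘ String.ofList) = (id : List Char → List Char) := by
        funext x; simp [String.toList_ofList]
      rw [hcomp, List.map_id]
      rw [pvMagWord m hm]
      rw [pvJoinAppend [' '] pre [m] hpre (by simp), PySem.Chars.join_singleton,
          pvJoinAppend [' '] pre [m ++ "th".toList] hpre (by simp), PySem.Chars.join_singleton]
      simp [List.append_assoc]
    · rw [if_neg hr]
      obtain ⟨hjoinH, hneH, hspH⟩ := pvTokSpec (n+1) (n - n % 100) (by omega) (by omega)
      obtain ⟨w, hw⟩ : ∃ w, lowSeg (n % 100) = [w] :=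
        ⟨_, pvLowSingleton (n % 100) (by omega)⟩
      have hwhead : (lowSeg (n % 100)).headD [] = w := by rw [hw]; rfl
      have hsplit : tokCore (n+1) n = tokCore (n+1) (n - n % 100) ++ [w] := by
        rw [pvTokSplit n n hsm, hw]
      rw [hsplit]
      simp only [List.map_append, List.map_cons, List.map_nil]
      rw [List.dropLast_concat, List.getLast?_concat]
      simp only [Option.getD_some]
      have hordsmall : ordCore n (n % 100) = ordCore (n % 100 + 1) (n % 100) := by
        have h := pvOrdLow (n - 1) (n % 100) (by omega)
        rw [show n - 1 + 1 = n from by omega] at h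
        exact h
      have hword : (ordinalWord (String.ofList w)).toList
          = (ordCore (n % 100 + 1) (n % 100)).toList := by
        rw [← hwhead, pvSmallWord (n % 100) (by omega) (by omega)]
      have hnwh : (number_to_words (n - n % 100)).toList
          = PySem.Chars.join [' '] (tokCore (n+1) (n - n % 100)) := by
        unfold number_to_words
        rw [if_neg (by omega : ¬ n - n % 100 = 0),
            pvCardFuelStr ((n - n % 100) + 1) (n - n % 100) (by omega) (by omega)]
        rw [(pvTokSpec ((n - n % 100) + 1) (n - n % 100) (by omega) (by omega)).1]
        rw [pvTokFuel ((n - n % 100) + 1) (n+1) (n - n % 100) (by omega) (by omega)]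
      apply String.toList_inj.mp
      rw [String.toList_append, String.toList_append, hnwh, hordsmall]
      rw [PySem.Str.toList_join, show (" " : String).toList = [' '] from by decide]
      simp only [List.map_append, List.map_map, List.map_cons, List.map_nil]
      have hcomp : (String.toList ∘ String.ofList) = (id : List Char → List Char) := by
        funext x; simp [String.toList_ofList]
      rw [hcomp, List.map_id]
      rw [hword]
      rw [pvJoinAppend [' '] _ _ hneH (by simp), PySem.Chars.join_singleton]

-- ===== VERDICT (by name: the statement is the Claim_ definition above) =====
theorem ordinal_to_words_spec : Claim_equal_ordinal_to_words := by
  intro n _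
  unfold Spec_ordinal_to_words ordinal_to_words ordinal_to_words_alt
  split
  · rw [pvMainPos]
  · rw [pvMainPos]
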